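-- pv_equiv track=rewrite | github.com/wongzc/NUS_IT5001_PE_answer | CS1010 2020_21 SEM1 PE1.py | decode_with_love
-- ===== SOURCE A (Python) =====
-- def decode(msg, offset):
--     offset=offset%26
--     l='ABCDEFGHIJKLMNOPQRSTUVWXYZ'
--     l=l[-offset:]+l[:-offset]
--     d={}
--     for i,c in enumerate(l):
--         if i<10:
--             k='0'+str(i)
--         else:
--             k=str(i)
--         d[k]=c
--     d['99']=' '
--     ans=''
--     for i in range(len(msg)//2):
--         ans+=d[msg[2*i]+msg[2*i+1]]
--     return ans
--
-- def decode_with_love(msg):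
--     d={c:i for i,c in enumerate('ABCDEFGHIJKLMNOPQRSTUVWXYZ')}
--     love=[d[i] for i in 'LOVE']
--     love26={}
--     l='ABCDEFGHIJKLMNOPQRSTUVWXYZ'
--     for shift in range(26):
--         d={c:i for i,c in enumerate(l)}
--         love=[d[i] for i in 'LOVE']
--         slove=''
--         for i in love:
--             if i<10:
--                 slove+='0'
--             slove+=str(i)
--         love26[slove]=shift
--         l=l[-1]+l[:-1]
--
--     shift=0
--     for k,v in love26.items():
--         if k in msg:
--             shift=v
--             break
--     return decode(msg, shift)
-- ===== SOURCE B (Python) =====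
-- def decode_with_love(msg):
--     # One left-to-right scan of the message itself: every 8-char all-digit
--     # window whose four 2-digit values are a consistent mod-26 shift of the
--     # base codes of L,O,V,E (11,14,21,4) yields a candidate shift; keep the
--     # smallest (A's shift-by-shift substring search also returns the minimal
--     # shift that occurs).  No 26-entry table, no 26 substring searches.
--     base = (11, 14, 21, 4)
--     shift = None
--     for p in range(len(msg) - 7):
--         w = msg[p:p + 8]
--         if w.isdigit():
--             s = (int(w[:2]) - 11) % 26
--             if all(int(w[2 * j:2 * j + 2]) == (base[j] + s) % 26 for j in range(4)):
--                 if shift is None or s < shift: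
--                     shift = s
--     if shift is None:
--         shift = 0
--     out = []
--     for i in range(0, len(msg) - 1, 2):
--         pair = msg[i:i + 2]
--         out.append(' ' if pair == '99' else chr((int(pair) - shift) % 26 + 65))
--     return ''.join(out)
-- ===== Notes on version B (the rewrite author's own statement) =====
-- stated objective: alternative
-- what changed: Instead of A's generate-and-test (build the 26-entry love26 table of all shifted LOVE encodings, test each as a substring, then decode through a rotated-alphabet index dict), B never enumerates shifts at all: it makes one left-to-right scan over the message's own 8-char digit windows, solves each window for a consistent mod-26 shift of the base codes (11,14,21,4) of L,O,V,E, keeps the minimal candidate shift (which equals A's first-found shift), and decodes each pair arithmetically with chr((int(pair)-shift)%26+65).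
import Mathlib
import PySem

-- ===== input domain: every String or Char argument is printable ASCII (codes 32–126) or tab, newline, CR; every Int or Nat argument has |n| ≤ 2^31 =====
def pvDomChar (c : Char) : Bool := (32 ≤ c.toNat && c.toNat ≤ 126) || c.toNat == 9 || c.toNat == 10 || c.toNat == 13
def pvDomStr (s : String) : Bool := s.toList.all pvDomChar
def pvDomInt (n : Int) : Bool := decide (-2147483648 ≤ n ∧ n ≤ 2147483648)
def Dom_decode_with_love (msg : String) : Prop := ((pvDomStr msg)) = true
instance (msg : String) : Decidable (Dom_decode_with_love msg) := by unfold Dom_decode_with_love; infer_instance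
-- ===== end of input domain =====

-- B replaces A's generate-and-test over 26 shifted LOVE encodings by one scan of the
-- message's own digit windows, solving each for a shift and keeping the minimum (objective: alternative).

-- ===== PORT A =====
-- {c: i for i, c in enumerate(l)}
def pvIdxDict (l : List Char) : PySem.Dict Char Int :=
  (PySem.List.enumerate l).foldl (fun d p => d.insert p.2 p.1) PySem.Dict.empty

-- l[-offset:] + l[:-offset]
def pvRot (l : List Char) (off : Int) : List Char :=
  PySem.List.slice l (some (-off)) none ++ PySem.List.slice l none (some (-off))

-- the dict built inside decode: index-string keys '00'..'25' over the rotated alphabet, plus '99' -> ' '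
def pvDictA (offset : Int) : PySem.Dict (List Char) Char :=
  ((PySem.List.enumerate (pvRot "ABCDEFGHIJKLMNOPQRSTUVWXYZ".toList offset)).foldl
      (fun d p =>
        d.insert (if p.1 < 10 then '0' :: PySem.Int.toChars p.1 else PySem.Int.toChars p.1) p.2)
      PySem.Dict.empty).insert ['9', '9'] ' '

-- decode(msg, offset); d[...] and msg[...] are ported with getD defaults that are
-- never reached on inputs satisfying Pre_ (all keys present, all indices in range)
def pvDecode (msg : String) (offset : Int) : String :=
  let offset := PySem.Int.mod offset 26
  let d := pvDictA offset
  let cs := msg.toList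
  String.ofList ((PySem.List.pyRange 0 (PySem.Int.floordiv (PySem.Str.len msg) 2) 1).foldl
    (fun ans i =>
      ans ++ [(d.get? [(PySem.List.pyGet? cs (2 * i)).getD '?',
                       (PySem.List.pyGet? cs (2 * i + 1)).getD '?']).getD '?'])
    [])

-- the love26 table: for each shift the 'LOVE' code string of the rotated alphabet
-- (the two dead pre-loop bindings of d/love in the Python are recomputed inside the loop)
def pvLove26 : PySem.Dict (List Char) Int :=
  ((PySem.List.pyRange 0 26 1).foldl
    (fun (st : PySem.Dict (List Char) Int × List Char) shift =>
      let d := pvIdxDict st.2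
      let love := "LOVE".toList.map (fun c => d.getD c 0)
      let slove := love.foldl (fun s i => (if i < 10 then s ++ ['0'] else s) ++ PySem.Int.toChars i) []
      (st.1.insert slove shift, pvRot st.2 1))
    (PySem.Dict.empty, "ABCDEFGHIJKLMNOPQRSTUVWXYZ".toList)).1

def decode_with_love (msg : String) : String :=
  let shift := ((pvLove26.items.find? (fun kv => PySem.Chars.isIn kv.1 msg.toList)).map (·.2)).getD 0
  pvDecode msg shift

-- ===== PORT B =====
-- base = (11, 14, 21, 4): the alphabet positions of L, O, V, E
def pvBase : List Int := [11, 14, 21, 4]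

-- the body of B's window test: w all digits, s solved from the first pair, then
-- all(int(w[2j:2j+2]) == (base[j]+s) % 26 for j in range(4)); int() ported with a
-- default that is unreached (the guard has checked every char is a digit)
def pvWinShift (w : List Char) : Option Int :=
  if PySem.Chars.strIsdigit w then
    let s := PySem.Int.mod ((PySem.Int.ofChars? (PySem.List.slice w none (some 2))).getD 0 - 11) 26
    if (PySem.List.pyRange 0 4 1).all (fun j =>
        (PySem.Int.ofChars? (PySem.List.slice w (some (2*j)) (some (2*j+2)))).getD 0
          == PySem.Int.mod ((PySem.List.pyGetD pvBase j 0) + s) 26) then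
      some s
    else none
  else none

-- 'if shift is None or s < shift: shift = s'
def pvScanStep (cs : List Char) (acc : Option Int) (p : Int) : Option Int :=
  match pvWinShift (PySem.List.slice cs (some p) (some (p + 8))) with
  | none => acc
  | some s => match acc with
    | none => some s
    | some m => if s < m then some s else acc

-- ' ' if pair == '99' else chr((int(pair) - shift) % 26 + 65); int() ported with a
-- default that is never reached on inputs satisfying Pre_ (the pair is all digits)
def pvCharB (shift : Int) (pair : List Char) : Char :=
  if pair = ['9', '9'] then ' '
  else Char.ofNat ((PySem.Int.mod ((PySem.Int.ofChars? pair).getD 0 - shift) 26) + 65).toNat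

def decode_with_love_alt (msg : String) : String :=
  let cs := msg.toList
  let shift := ((PySem.List.pyRange 0 (PySem.Str.len msg - 7) 1).foldl (pvScanStep cs) none).getD 0
  String.ofList ((PySem.List.pyRange 0 (PySem.Str.len msg - 1) 2).foldl
    (fun acc i => acc ++ [pvCharB shift (PySem.List.slice cs (some i) (some (i + 2)))])
    [])

-- ===== PRECONDITION & SPEC =====
-- consecutive disjoint 2-char chunks (a trailing odd char is ignored, as both Pythons do)
def pvPairsOf : List Char → List (Char × Char)
  | a :: b :: rest => (a, b) :: pvPairsOf rest
  | _ => []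

-- the pair is one of the keys of A's decode table: a zero-padded code below 26, or the space code
def pvValidPair (a b : Char) : Bool :=
  PySem.Chars.isdigit a && PySem.Chars.isdigit b &&
    (10 * (a.toNat - 48) + (b.toNat - 48) ≤ 25 || 10 * (a.toNat - 48) + (b.toNat - 48) == 99)

-- A raises KeyError on any 2-char chunk that is neither a zero-padded code below 26 nor the space code; Pre_ excludes exactly those inputs.
def Pre_decode_with_love (msg : String) : Prop :=
  (pvPairsOf msg.toList).all (fun p => pvValidPair p.1 p.2) = true
instance (msg : String) : Decidable (Pre_decode_with_love msg) := by
  unfold Pre_decode_with_love; infer_instance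

def pvWitness_decode_with_love : String := "1114210499170403"

def Spec_decode_with_love (msg : String) (out : String) : Prop := out = decode_with_love_alt msg
instance (msg : String) (out : String) : Decidable (Spec_decode_with_love msg out) := by
  unfold Spec_decode_with_love; infer_instance

-- ===== CLAIM (what is proved, stated in full; the proofs are below) =====
def Claim_equal_decode_with_love : Prop :=
  ∀ (msg : String), Dom_decode_with_love msg → Pre_decode_with_love msg →
    Spec_decode_with_love msg (decode_with_love msg)

-- ===== LEMMAS AND PROOFS =====

-- '%02d' zero-padding of a code 0..25 (used only to STATE what a window must look like)
def pvPad2 (n : Int) : List Char :=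
  if n < 10 then '0' :: PySem.Int.toChars n else PySem.Int.toChars n

-- the 8-char LOVE signature of a shift: codes (11,14,21,4)+s mod 26, zero-padded
def pvSig (s : Int) : List Char :=
  pvBase.flatMap (fun b => pvPad2 (PySem.Int.mod (b + s) 26))

-- A's per-pair translation: lookup in the decode table for a given (already reduced) offset
def pvTA (offset : Int) (a b : Char) : Char := ((pvDictA offset).get? [a, b]).getD '?'

-- A's love26 table is exactly the signature list, shift by shift
set_option maxRecDepth 40000 in
lemma pvLove26_items :
    pvLove26.items = (PySem.List.pyRange 0 26 1).map (fun s => (pvSig s, s)) := by decide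

lemma pvDigit_spec (c : Char) (h : PySem.Chars.isdigit c = true) :
    48 ≤ c.toNat ∧ c.toNat ≤ 57 := by
  simp only [PySem.Chars.isdigit, Bool.and_eq_true, decide_eq_true_eq] at h
  exact h

lemma pvOfChars2 : ∀ a : Nat, a < 10 → ∀ b : Nat, b < 10 →
    PySem.Int.ofChars? [Char.ofNat (48+a), Char.ofNat (48+b)] = some ((10*a+b : Nat) : Int) := by decide

set_option maxRecDepth 10000 in
lemma pvPad2_repr : ∀ a : Nat, a < 10 → ∀ b : Nat, b < 10 → ∀ v : Nat, v < 26 →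
    10*a+b = v → [Char.ofNat (48+a), Char.ofNat (48+b)] = pvPad2 ((v : Nat) : Int) := by decide

lemma pvWinShift_sound (w : List Char) (hw : w.length = 8) (s : Int)
    (h : pvWinShift w = some s) : w = pvSig s := by
  obtain ⟨c0, w, rfl⟩ := List.exists_of_length_succ w (by omega)
  have hw1 : w.length = 7 := by simpa using hw
  obtain ⟨c1, w, rfl⟩ := List.exists_of_length_succ w (by omega)
  have hw2 : w.length = 6 := by simpa using hw1
  obtain ⟨c2, w, rfl⟩ := List.exists_of_length_succ w (by omega)
  have hw3 : w.length = 5 := by simpa using hw2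
  obtain ⟨c3, w, rfl⟩ := List.exists_of_length_succ w (by omega)
  have hw4 : w.length = 4 := by simpa using hw3
  obtain ⟨c4, w, rfl⟩ := List.exists_of_length_succ w (by omega)
  have hw5 : w.length = 3 := by simpa using hw4
  obtain ⟨c5, w, rfl⟩ := List.exists_of_length_succ w (by omega)
  have hw6 : w.length = 2 := by simpa using hw5
  obtain ⟨c6, w, rfl⟩ := List.exists_of_length_succ w (by omega)
  have hw7 : w.length = 1 := by simpa using hw6
  obtain ⟨c7, w, rfl⟩ := List.exists_of_length_succ w (by omega)
  obtain rfl : w = [] := by simpa using hw7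
  unfold pvWinShift at h
  cases h1 : PySem.Chars.strIsdigit [c0, c1, c2, c3, c4, c5, c6, c7]
  · simp [h1] at h
  · rw [h1] at h
    rw [if_pos rfl] at h
    dsimp only at h
    split_ifs at h with h2
    · injection h with hval
      rw [hval] at h2
      rw [show PySem.List.pyRange 0 4 1 = [0, 1, 2, 3] from by decide] at h2
      simp only [List.all_cons, List.all_nil, Bool.and_eq_true, beq_iff_eq, and_true] at h2
      obtain ⟨e0, e1, e2, e3⟩ := h2
      have hall : ∀ c ∈ ([c0, c1, c2, c3, c4, c5, c6, c7] : List Char), PySem.Chars.isdigit c = true := by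
        simpa [PySem.Chars.strIsdigit, List.all_eq_true] using h1
      have hc0 := pvDigit_spec c0 (hall c0 (by simp))
      have hc1 := pvDigit_spec c1 (hall c1 (by simp))
      have hc2 := pvDigit_spec c2 (hall c2 (by simp))
      have hc3 := pvDigit_spec c3 (hall c3 (by simp))
      have hc4 := pvDigit_spec c4 (hall c4 (by simp))
      have hc5 := pvDigit_spec c5 (hall c5 (by simp))
      have hc6 := pvDigit_spec c6 (hall c6 (by simp))
      have hc7 := pvDigit_spec c7 (hall c7 (by simp))
      have rc : ∀ c : Char, 48 ≤ c.toNat → c = Char.ofNat (48 + (c.toNat - 48)) := by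
        intro c hc
        rw [show 48 + (c.toNat - 48) = c.toNat from by omega, Char.ofNat_toNat]
      have goPair : ∀ a b : Char, 48 ≤ a.toNat → a.toNat ≤ 57 → 48 ≤ b.toNat → b.toNat ≤ 57 →
          ∀ t : Int, (PySem.Int.ofChars? [a, b]).getD 0 = PySem.Int.mod t 26 →
          [a, b] = pvPad2 (PySem.Int.mod t 26) := by
        intro a b ha1 ha2 hb1 hb2 t het
        have hnn := PySem.Int.mod_nonneg t (show (0:Int) < 26 by norm_num)
        have hlt := PySem.Int.mod_lt t (show (0:Int) < 26 by norm_num)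
        rw [rc a ha1, rc b hb1] at het ⊢
        rw [pvOfChars2 _ (by omega) _ (by omega)] at het
        simp only [Option.getD_some] at het
        have hv : (10 * (a.toNat - 48) + (b.toNat - 48) : Nat) = (PySem.Int.mod t 26).toNat := by omega
        rw [show PySem.Int.mod t 26 = (((PySem.Int.mod t 26).toNat : Nat) : Int) from by omega]
        exact pvPad2_repr _ (by omega) _ (by omega) _ (by omega) hv
      have r0 : PySem.List.slice ([c0, c1, c2, c3, c4, c5, c6, c7] : List Char) (some (2*0)) (some (2*0+2)) = [c0, c1] := rfl
      have r1 : PySem.List.slice ([c0, c1, c2, c3, c4, c5, c6, c7] : List Char) (some (2*1)) (some (2*1+2)) = [c2, c3] := rfl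
      have r2 : PySem.List.slice ([c0, c1, c2, c3, c4, c5, c6, c7] : List Char) (some (2*2)) (some (2*2+2)) = [c4, c5] := rfl
      have r3 : PySem.List.slice ([c0, c1, c2, c3, c4, c5, c6, c7] : List Char) (some (2*3)) (some (2*3+2)) = [c6, c7] := rfl
      rw [r0] at e0; rw [r1] at e1; rw [r2] at e2; rw [r3] at e3
      have p0 := goPair c0 c1 hc0.1 hc0.2 hc1.1 hc1.2 _ e0
      have p1 := goPair c2 c3 hc2.1 hc2.2 hc3.1 hc3.2 _ e1
      have p2 := goPair c4 c5 hc4.1 hc4.2 hc5.1 hc5.2 _ e2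
      have p3 := goPair c6 c7 hc6.1 hc6.2 hc7.1 hc7.2 _ e3
      simp only [pvSig, pvBase, List.flatMap_cons, List.flatMap_nil, List.append_nil]
      rw [show PySem.List.pyGetD pvBase 0 0 = 11 from rfl] at p0
      rw [show PySem.List.pyGetD pvBase 1 0 = 14 from rfl] at p1
      rw [show PySem.List.pyGetD pvBase 2 0 = 21 from rfl] at p2
      rw [show PySem.List.pyGetD pvBase 3 0 = 4 from rfl] at p3
      rw [← p0, ← p1, ← p2, ← p3]
      rfl

lemma pvStep_val (cs : List Char) (acc : Option Int) (a : Int) (sa : Int)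
    (hw : pvWinShift (PySem.List.slice cs (some a) (some (a + 8))) = some sa) :
    ∃ v, pvScanStep cs acc a = some v ∧ v ≤ sa ∧ (∀ m0, acc = some m0 → v ≤ m0) ∧
      (v = sa ∨ acc = some v) := by
  unfold pvScanStep
  rw [hw]
  cases acc with
  | none => exact ⟨sa, rfl, le_refl _, by simp, Or.inl rfl⟩
  | some m0 =>
    dsimp only
    by_cases hlt : sa < m0
    · rw [if_pos hlt]
      exact ⟨sa, rfl, le_refl _, by intro x hx; injection hx with e; omega, Or.inl rfl⟩
    · rw [if_neg hlt]
      exact ⟨m0, rfl, by omega, by intro x hx; injection hx with e; omega, Or.inr rfl⟩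

lemma pvScan_spec (cs : List Char) : ∀ (ps : List Int) (acc : Option Int),
    (ps.foldl (pvScanStep cs) acc = none ↔
      acc = none ∧ ∀ p ∈ ps, pvWinShift (PySem.List.slice cs (some p) (some (p + 8))) = none) ∧
    (∀ m, ps.foldl (pvScanStep cs) acc = some m →
      (acc = some m ∨ ∃ p ∈ ps, pvWinShift (PySem.List.slice cs (some p) (some (p + 8))) = some m) ∧
      (∀ m', (∃ p ∈ ps, pvWinShift (PySem.List.slice cs (some p) (some (p + 8))) = some m') → m ≤ m') ∧
      (∀ m', acc = some m' → m ≤ m')) := by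
  intro ps
  induction ps with
  | nil =>
    intro acc
    refine ⟨by simp, ?_⟩
    intro m h
    simp only [List.foldl_nil] at h
    refine ⟨Or.inl h, by simp, ?_⟩
    intro m' hm'
    rw [h] at hm'
    injection hm' with e
    omega
  | cons a t ih =>
    intro acc
    simp only [List.foldl_cons]
    obtain ⟨ihn, ihs⟩ := ih (pvScanStep cs acc a)
    constructor
    · rw [ihn]
      cases hw : pvWinShift (PySem.List.slice cs (some a) (some (a + 8))) with
      | none =>
        have hst : pvScanStep cs acc a = acc := by unfold pvScanStep; rw [hw]
        rw [hst]
        constructor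
        · rintro ⟨h1, h2⟩
          refine ⟨h1, ?_⟩
          intro p hp
          rcases List.mem_cons.1 hp with rfl | hpt
          · exact hw
          · exact h2 p hpt
        · rintro ⟨h1, h2⟩
          exact ⟨h1, fun p hp => h2 p (List.mem_cons_of_mem _ hp)⟩
      | some sa =>
        obtain ⟨v, hv, _, _, _⟩ := pvStep_val cs acc a sa hw
        constructor
        · rintro ⟨h1, h2⟩
          rw [hv] at h1
          cases h1
        · rintro ⟨h1, h2⟩
          have := h2 a (List.mem_cons_self)
          rw [hw] at this
          cases this
    · intro m h
      obtain ⟨hex, hmin, haccmin⟩ := ihs m h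
      cases hw : pvWinShift (PySem.List.slice cs (some a) (some (a + 8))) with
      | none =>
        have hst : pvScanStep cs acc a = acc := by unfold pvScanStep; rw [hw]
        rw [hst] at hex haccmin
        refine ⟨?_, ?_, haccmin⟩
        · rcases hex with h1 | ⟨p, hp, hps⟩
          · exact Or.inl h1
          · exact Or.inr ⟨p, List.mem_cons_of_mem _ hp, hps⟩
        · intro m' ⟨p, hp, hps⟩
          rcases List.mem_cons.1 hp with rfl | hpt
          · rw [hw] at hps; cases hps
          · exact hmin m' ⟨p, hpt, hps⟩
      | some sa =>
        obtain ⟨v, hv, hvsa, hvacc, hvor⟩ := pvStep_val cs acc a sa hw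
        have hmv : m ≤ v := haccmin v hv
        refine ⟨?_, ?_, ?_⟩
        · rcases hex with h1 | ⟨p, hp, hps⟩
          · rw [hv] at h1
            injection h1 with e
            subst e
            rcases hvor with rfl | hacc
            · exact Or.inr ⟨a, List.mem_cons_self, hw⟩
            · exact Or.inl hacc
          · exact Or.inr ⟨p, List.mem_cons_of_mem _ hp, hps⟩
        · intro m' ⟨p, hp, hps⟩
          rcases List.mem_cons.1 hp with rfl | hpt
          · rw [hw] at hps
            injection hps with e
            omega
          · exact hmin m' ⟨p, hpt, hps⟩
        · intro m' hm'
          have := hvacc m' hm'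
          omega

lemma pvWinShift_bounds (w : List Char) (s : Int) (h : pvWinShift w = some s) :
    0 ≤ s ∧ s < 26 := by
  unfold pvWinShift at h
  cases h1 : PySem.Chars.strIsdigit w
  · simp [h1] at h
  · rw [h1] at h
    rw [if_pos rfl] at h
    dsimp only at h
    split_ifs at h with h2
    · injection h with e
      subst e
      exact ⟨PySem.Int.mod_nonneg _ (by norm_num), PySem.Int.mod_lt _ (by norm_num)⟩

set_option maxRecDepth 40000 in
lemma pvWinShift_sig : ∀ t : Nat, t < 26 →
    pvWinShift (pvSig (t : Int)) = some (t : Int) ∧ (pvSig (t : Int)).length = 8 := by decide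

lemma pvSliceWin (cs : List Char) (p : Int) (hp0 : 0 ≤ p) (hp : p + 8 ≤ (cs.length : Int)) :
    PySem.List.slice cs (some p) (some (p+8)) = (cs.drop p.toNat).take 8 ∧
      (PySem.List.slice cs (some p) (some (p+8))).length = 8 := by
  have h1 : PySem.List.slice cs (some p) (some (p+8)) = (cs.drop p.toNat).take 8 := by
    rw [PySem.List.slice_toNat _ hp0 (by omega)]
    congr 1
    omega
  refine ⟨h1, ?_⟩
  rw [h1]
  simp only [List.length_take, List.length_drop]
  omega

lemma pvFind_min {l : List Int} (hl : l.Pairwise (· < ·)) (p : Int → Bool) (x : Int)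
    (h : l.find? p = some x) : ∀ y ∈ l, p y = true → x ≤ y := by
  induction l with
  | nil => simp at h
  | cons a t ih =>
    rw [List.find?_cons] at h
    by_cases hpa : p a = true
    · simp only [hpa] at h
      obtain rfl : a = x := by simpa using h
      intro y hy hpy
      rcases List.mem_cons.1 hy with rfl | hyt
      · exact le_refl _
      · exact le_of_lt ((List.pairwise_cons.1 hl).1 y hyt)
    · rw [Bool.not_eq_true] at hpa
      simp only [hpa] at h
      intro y hy hpy
      rcases List.mem_cons.1 hy with rfl | hyt
      · rw [hpy] at hpa; cases hpa
      · exact ih (List.pairwise_cons.1 hl).2 h y hyt hpy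

lemma pvCand_iff (cs : List Char) (s : Int) (hs : 0 ≤ s) (hs' : s < 26) :
    PySem.Chars.isIn (pvSig s) cs = true ↔
      ∃ p ∈ PySem.List.pyRange 0 ((cs.length : Int) - 7) 1,
        pvWinShift (PySem.List.slice cs (some p) (some (p + 8))) = some s := by
  constructor
  · intro hin
    obtain ⟨j, hj⟩ := (PySem.Chars.exists_prefix_drop_iff_isIn _ _).2 hin
    obtain ⟨t, ht, rfl⟩ : ∃ t : Nat, t < 26 ∧ s = (t : Int) := ⟨s.toNat, by omega, by omega⟩
    have hlen : (pvSig (t : Int)).length = 8 := (pvWinShift_sig t ht).2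
    have hle := hj.length_le
    rw [hlen, List.length_drop] at hle
    refine ⟨(j : Int), ?_, ?_⟩
    · rw [PySem.List.mem_pyRange_one]
      constructor
      · positivity
      · omega
    · have heq : PySem.List.slice cs (some (j:Int)) (some ((j:Int)+8)) = pvSig (t:Int) := by
        rw [(pvSliceWin cs (j:Int) (by positivity) (by omega)).1]
        rw [Int.toNat_natCast]
        have h2 := List.prefix_iff_eq_take.1 hj
        rw [hlen] at h2
        exact h2.symm
      rw [heq]
      exact (pvWinShift_sig t ht).1
  · rintro ⟨p, hp, hps⟩
    rw [PySem.List.mem_pyRange_one] at hp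
    have hp8 : p + 8 ≤ (cs.length : Int) := by omega
    obtain ⟨hsl, hlen⟩ := pvSliceWin cs p hp.1 hp8
    have hsound := pvWinShift_sound _ hlen s hps
    have hpref : pvSig s <+: cs.drop p.toNat := by
      rw [← hsound, hsl]
      exact List.take_prefix _ _
    exact (PySem.Chars.exists_prefix_drop_iff_isIn _ _).1 ⟨p.toNat, hpref⟩

lemma pvShift_core (cs : List Char) :
    ((PySem.List.pyRange 0 26 1).find? (fun s => PySem.Chars.isIn (pvSig s) cs)).getD 0
      = ((PySem.List.pyRange 0 ((cs.length : Int) - 7) 1).foldl (pvScanStep cs) none).getD 0 := by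
  obtain ⟨hn, hsome⟩ := pvScan_spec cs (PySem.List.pyRange 0 ((cs.length : Int) - 7) 1) none
  cases hr : (PySem.List.pyRange 0 ((cs.length : Int) - 7) 1).foldl (pvScanStep cs) none with
  | none =>
    have hall := (hn.1 hr).2
    have hfn : (PySem.List.pyRange 0 26 1).find? (fun s => PySem.Chars.isIn (pvSig s) cs) = none := by
      rw [List.find?_eq_none]
      intro s hsmem
      rw [PySem.List.mem_pyRange_one] at hsmem
      simp only [Bool.not_eq_true]
      cases hin : PySem.Chars.isIn (pvSig s) cs
      · rfl
      · obtain ⟨p, hp, hps⟩ := (pvCand_iff cs s hsmem.1 hsmem.2).1 hin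
        rw [hall p hp] at hps
        cases hps
    rw [hfn]
  | some m =>
    obtain ⟨hex, hmin, _⟩ := hsome m hr
    rcases hex with h1 | ⟨p, hp, hps⟩
    · cases h1
    · have hb := pvWinShift_bounds _ _ hps
      have hin : PySem.Chars.isIn (pvSig m) cs = true := (pvCand_iff cs m hb.1 hb.2).2 ⟨p, hp, hps⟩
      have hmem : m ∈ PySem.List.pyRange 0 26 1 := by
        rw [PySem.List.mem_pyRange_one]; exact ⟨hb.1, hb.2⟩
      have hiss : ((PySem.List.pyRange 0 26 1).find? (fun s => PySem.Chars.isIn (pvSig s) cs)).isSome = true := by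
        rw [List.find?_isSome]; exact ⟨m, hmem, hin⟩
      obtain ⟨x, hx⟩ := Option.isSome_iff_exists.1 hiss
      have hpx : PySem.Chars.isIn (pvSig x) cs = true := by simpa using List.find?_some hx
      have hxmem := List.mem_of_find?_eq_some hx
      rw [PySem.List.mem_pyRange_one] at hxmem
      have hxm : x ≤ m := pvFind_min (by decide) _ x hx m hmem hin
      have hmx : m ≤ x := by
        obtain ⟨q, hq, hqs⟩ := (pvCand_iff cs x hxmem.1 hxmem.2).1 hpx
        exact hmin x ⟨q, hq, hqs⟩
      rw [hx]
      simp only [Option.getD_some]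
      omega

-- the two shift computations agree on every string
lemma pvShift_eq (cs : List Char) :
    ((pvLove26.items.find? (fun kv => PySem.Chars.isIn kv.1 cs)).map (·.2)).getD 0
      = ((PySem.List.pyRange 0 ((cs.length : Int) - 7) 1).foldl (pvScanStep cs) none).getD 0 := by
  rw [pvLove26_items, List.find?_map]
  simp only [Option.map_map, Function.comp_def, Option.map_id']
  exact pvShift_core cs

set_option maxRecDepth 40000 in
lemma pvPair_eq : ∀ j : Nat, j < 26 → ∀ a : Nat, a < 10 → ∀ b : Nat, b < 10 →
    (10 * a + b ≤ 25 ∨ 10 * a + b = 99) →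
    pvTA (j : Int) (Char.ofNat (48 + a)) (Char.ofNat (48 + b))
      = pvCharB (j : Int) [Char.ofNat (48 + a), Char.ofNat (48 + b)] := by decide

lemma pvPairs1 (g : Char → Char → Char) : ∀ cs : List Char,
    (List.range (cs.length / 2)).map (fun k => g (cs.getD (2*k) '?') (cs.getD (2*k+1) '?'))
      = (pvPairsOf cs).map (fun p => g p.1 p.2) := by
  intro cs
  induction cs using pvPairsOf.induct with
  | case1 a b rest ih =>
      have hl : (a :: b :: rest).length / 2 = rest.length / 2 + 1 := by simp only [List.length_cons]; omega
      rw [hl, List.range_succ_eq_map, List.map_cons, List.map_map]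
      simp only [pvPairsOf, List.map_cons]
      congr 1
  | case2 t ht =>
      cases t with
      | nil => simp [pvPairsOf]
      | cons x xs =>
        cases xs with
        | nil => simp [pvPairsOf]
        | cons y ys => exact absurd rfl (fun h => ht x y ys h)

lemma pvPairs2 (f : List Char → Char) : ∀ cs : List Char,
    (List.range (cs.length / 2)).map (fun k => f ((cs.drop (2*k)).take 2))
      = (pvPairsOf cs).map (fun p => f [p.1, p.2]) := by
  intro cs
  induction cs using pvPairsOf.induct with
  | case1 a b rest ih =>
      have hl : (a :: b :: rest).length / 2 = rest.length / 2 + 1 := by simp only [List.length_cons]; omega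
      rw [hl, List.range_succ_eq_map, List.map_cons, List.map_map]
      simp only [pvPairsOf, List.map_cons]
      congr 1
  | case2 t ht =>
      cases t with
      | nil => simp [pvPairsOf]
      | cons x xs =>
        cases xs with
        | nil => simp [pvPairsOf]
        | cons y ys => exact absurd rfl (fun h => ht x y ys h)

lemma pvLoopA (g : Char → Char → Char) (cs : List Char) :
    (PySem.List.pyRange 0 (PySem.Int.floordiv ((cs.length : Int)) 2) 1).foldl
      (fun ans i => ans ++ [g ((PySem.List.pyGet? cs (2*i)).getD '?')
                              ((PySem.List.pyGet? cs (2*i+1)).getD '?')]) []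
      = (pvPairsOf cs).map (fun p => g p.1 p.2) := by
  have hf : PySem.Int.floordiv ((cs.length : Int)) 2 = ((cs.length / 2 : Nat) : Int) := by
    exact_mod_cast PySem.Int.floordiv_natCast cs.length 2
  rw [hf, PySem.List.pyRange_zero_nat, List.foldl_map]
  have hfun : (fun (ans : List Char) (k : Nat) =>
      ans ++ [g ((PySem.List.pyGet? cs (2*(k:Int))).getD '?') ((PySem.List.pyGet? cs (2*(k:Int)+1)).getD '?')])
      = fun ans k => ans ++ [g (cs.getD (2*k) '?') (cs.getD (2*k+1) '?')] := by
    funext ans k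
    have e1 : (2*(k:Int)) = ((2*k : Nat) : Int) := by push_cast; ring
    have e2 : (((2*k : Nat) : Int)+1) = ((2*k+1 : Nat) : Int) := by push_cast; ring
    rw [e1, e2, PySem.List.pyGet?_natCast, PySem.List.pyGet?_natCast,
        ← List.getD_eq_getElem?_getD, ← List.getD_eq_getElem?_getD]
  rw [hfun, PySem.List.foldl_append_singleton_eq_map
        (f := fun k => g (cs.getD (2*k) '?') (cs.getD (2*k+1) '?')),
      List.nil_append, pvPairs1]

lemma pvLoopB (f : List Char → Char) (cs : List Char) :
    (PySem.List.pyRange 0 ((cs.length : Int) - 1) 2).foldl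
      (fun acc i => acc ++ [f (PySem.List.slice cs (some i) (some (i+2)))]) []
      = (pvPairsOf cs).map (fun p => f [p.1, p.2]) := by
  rw [PySem.List.pyRange_of_pos 0 ((cs.length : Int) - 1) (by norm_num)]
  have hcnt : (if (0:Int) < (cs.length : Int) - 1 then (((cs.length : Int) - 1 - 0 + 2 - 1)/2).toNat else 0)
      = cs.length / 2 := by split_ifs <;> omega
  rw [hcnt, List.foldl_map]
  have hfun : (fun (acc : List Char) (k : Nat) =>
      acc ++ [f (PySem.List.slice cs (some ((0:Int) + 2*(k:Int))) (some ((0:Int) + 2*(k:Int) + 2)))])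
      = fun acc k => acc ++ [f ((cs.drop (2*k)).take 2)] := by
    funext acc k
    rw [PySem.List.slice_toNat _ (by positivity) (by positivity)]
    have e1 : ((0:Int) + 2*(k:Int)).toNat = 2*k := by omega
    have e2 : ((0:Int) + 2*(k:Int) + 2).toNat = 2*k + 2 := by omega
    rw [e1, e2]
    have e3 : 2*k + 2 - 2*k = 2 := by omega
    rw [e3]
  rw [hfun, PySem.List.foldl_append_singleton_eq_map
        (f := fun k => f ((cs.drop (2*k)).take 2)),
      List.nil_append, pvPairs2]

-- ===== VERDICT (by name: the statement is the Claim_ definition above) =====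
set_option maxHeartbeats 1000000 in
theorem decode_with_love_spec : Claim_equal_decode_with_love := by
  intro msg _ hpre
  unfold Spec_decode_with_love
  simp only [decode_with_love, decode_with_love_alt, pvDecode, PySem.Str.len_eq]
  rw [pvShift_eq msg.toList]
  set s := ((PySem.List.pyRange 0 ((msg.toList.length : Int) - 7) 1).foldl (pvScanStep msg.toList) none).getD 0 with hs
  have hsr : 0 ≤ s ∧ s < 26 := by
    rcases hr : (PySem.List.pyRange 0 ((msg.toList.length : Int) - 7) 1).foldl (pvScanStep msg.toList) none with _ | m
    · rw [hs, hr]; norm_num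
    · obtain ⟨hex, -, -⟩ := (pvScan_spec msg.toList (PySem.List.pyRange 0 ((msg.toList.length : Int) - 7) 1) none).2 m hr
      rcases hex with h1 | ⟨p, hp, hps⟩
      · cases h1
      · have hb := pvWinShift_bounds _ _ hps
        rw [hs, hr]
        simpa using hb
  have hmod : PySem.Int.mod s 26 = s := by
    rw [PySem.Int.mod_eq_emod_of_pos (by norm_num)]
    exact Int.emod_eq_of_lt hsr.1 hsr.2
  rw [hmod]
  have hA := pvLoopA (pvTA s) msg.toList
  unfold pvTA at hA
  rw [hA, pvLoopB (pvCharB s) msg.toList]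
  congr 1
  apply List.map_congr_left
  intro p hp
  have hv : pvValidPair p.1 p.2 = true := by
    unfold Pre_decode_with_love at hpre
    rw [List.all_eq_true] at hpre
    exact hpre p hp
  unfold pvValidPair at hv
  simp only [Bool.and_eq_true, Bool.or_eq_true, decide_eq_true_eq, beq_iff_eq] at hv
  obtain ⟨⟨hd1, hd2⟩, hcond⟩ := hv
  obtain ⟨ha1, ha2⟩ := pvDigit_spec _ hd1
  obtain ⟨hb1, hb2⟩ := pvDigit_spec _ hd2
  obtain ⟨j, hj, hsj⟩ : ∃ j : Nat, j < 26 ∧ s = (j : Int) := ⟨s.toNat, by omega, by omega⟩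
  have e1 : p.1 = Char.ofNat (48 + (p.1.toNat - 48)) := by
    rw [show 48 + (p.1.toNat - 48) = p.1.toNat from by omega, Char.ofNat_toNat]
  have e2 : p.2 = Char.ofNat (48 + (p.2.toNat - 48)) := by
    rw [show 48 + (p.2.toNat - 48) = p.2.toNat from by omega, Char.ofNat_toNat]
  rw [hsj, e1, e2]
  exact pvPair_eq j hj _ (by omega) _ (by omega) (by omega)
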